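-- pv_equiv track=rewrite | github.com/Yeyoung70/Yeyoung70 | 03_Study/Algorithm/P3.py | solution
-- ===== SOURCE A (Python) =====
-- def solution(n):
--     answer = 0
--     count = [0]*10
--     while n:
--         count[n%10] += 1
--         n //= 10
--     # [0, 2, 1, 1, 0, 0, 0, 1, 1, 0]
--     현재자릿수 = 1
--     # 반복문
--     for i, c in enumerate(count):
--         for _ in range(c):
--             answer += i * 현재자릿수
--             현재자릿수 *= 10
--     return answer
-- ===== SOURCE B (Python) =====
-- def solution(n):
--     digits = []
--     while n:
--         n, d = divmod(n, 10)
--         digits.append(d)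
--     answer = 0
--     for d in sorted(digits, reverse=True):
--         answer = answer * 10 + d
--     return answer
-- ===== Notes on version B (the rewrite author's own statement) =====
-- stated objective: alternative
-- what changed: Replaces A's 10-bucket counting sort with place-value accumulation (answer += digit*place, place *= 10, scanning buckets ascending) by collecting the digits with divmod, sorting them descending with the library sort, and rebuilding the number with a single Horner fold (answer = answer*10 + d).
import Mathlib
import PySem

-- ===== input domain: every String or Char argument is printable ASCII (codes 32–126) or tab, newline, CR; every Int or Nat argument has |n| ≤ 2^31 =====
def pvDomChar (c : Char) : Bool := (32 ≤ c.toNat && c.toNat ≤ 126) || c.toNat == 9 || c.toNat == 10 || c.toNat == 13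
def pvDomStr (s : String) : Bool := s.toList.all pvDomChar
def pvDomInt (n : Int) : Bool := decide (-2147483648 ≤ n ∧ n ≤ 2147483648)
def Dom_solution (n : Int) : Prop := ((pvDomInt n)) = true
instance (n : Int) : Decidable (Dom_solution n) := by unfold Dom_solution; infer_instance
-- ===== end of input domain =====

-- B rebuilds the number by a library sort (descending) of the divmod-collected digits and a
-- Horner fold, instead of A's 10-bucket counting sort with a growing place multiplier.

-- ===== PORT A =====
-- 'while n: count[n%10] += 1; n //= 10'.  The guard '0 < n' is a totality guard only: it agrees
-- with Python's 'n != 0' on all n ≥ 0; for n < 0 the Python loop never terminates (n //= 10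
-- stalls at -1), so no input on which Python A returns is affected.
def countLoopA (n : Int) (count : List Int) : List Int :=
  if 0 < n then
    countLoopA (PySem.Int.floordiv n 10)
      (PySem.List.pySetD count (PySem.Int.mod n 10)
        (PySem.List.pyGetD count (PySem.Int.mod n 10) 0 + 1))
  else count
termination_by n.toNat
decreasing_by
  rw [PySem.Int.floordiv_eq_ediv_of_pos (by norm_num)]
  omega

def solution (n : Int) : Int :=
  -- answer = 0; count = [0]*10; while-loop; 현재자릿수 = 1; nested for over enumerate(count)
  let count := countLoopA n (PySem.List.pyRepeat [0] 10)
  let res := (PySem.List.enumerate count 0).foldl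
      (fun st p => (PySem.List.pyRange 0 p.2 1).foldl
        (fun st _ => (st.1 + p.1 * st.2, st.2 * 10)) st) ((0 : Int), (1 : Int))
  res.1

-- ===== PORT B =====
-- 'while n: n, d = divmod(n, ten); digits.append(d)' — the divisor is a nonzero constant,
-- so divmod never raises and is ported exactly as its floordiv/mod pair.  Totality guard as in A (Python B's loop likewise never terminates for n < 0).
def digitsLoopB (n : Int) (acc : List Int) : List Int :=
  if 0 < n then digitsLoopB (PySem.Int.floordiv n 10) (acc ++ [PySem.Int.mod n 10]) else acc
termination_by n.toNat
decreasing_by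
  rw [PySem.Int.floordiv_eq_ediv_of_pos (by norm_num)]
  omega

def solution_alt (n : Int) : Int :=
  let digits := digitsLoopB n []
  (PySem.List.sorted digits (fun d => d) true).foldl (fun a d => a * 10 + d) 0

-- ===== PRECONDITION & SPEC =====
def Spec_solution (n : Int) (out : Int) : Prop := out = solution_alt n
instance (n : Int) (out : Int) : Decidable (Spec_solution n out) := by unfold Spec_solution; infer_instance

-- ===== CLAIM (what is proved, stated in full; the proofs are below) =====
def Claim_equal_solution : Prop := ∀ (n : Int), Dom_solution n → Spec_solution n (solution n)

-- ===== LEMMAS AND PROOFS =====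

-- the digit list of n, least significant first (proof-side model of both loops)
def pvDigits (n : Int) : List Int :=
  if 0 < n then PySem.Int.mod n 10 :: pvDigits (PySem.Int.floordiv n 10) else []
termination_by n.toNat
decreasing_by
  rw [PySem.Int.floordiv_eq_ediv_of_pos (by norm_num)]
  omega

-- value of a little-endian digit list
def pvVal : List Int → Int
  | [] => 0
  | d :: t => d + 10 * pvVal t

-- A's transition on (answer, place) for one digit
def pvStep (st : Int × Int) (d : Int) : Int × Int := (st.1 + d * st.2, st.2 * 10)

-- the ascending digit list encoded by a count array starting at value s
def pvAsc : List Int → Int → List Int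
  | [], _ => []
  | c :: t, s => List.replicate c.toNat s ++ pvAsc t (s + 1)

lemma pvDigits_nonneg_lt (n : Int) : ∀ x ∈ pvDigits n, 0 ≤ x ∧ x < 10 := by
  fun_induction pvDigits n with
  | case1 n h ih =>
      intro x hx
      rcases List.mem_cons.mp hx with rfl | hx
      · exact ⟨PySem.Int.mod_nonneg _ (by norm_num), PySem.Int.mod_lt _ (by norm_num)⟩
      · exact ih x hx
  | case2 n h => intro x hx; simp at hx

lemma digitsLoopB_eq (n : Int) : ∀ (acc : List Int), digitsLoopB n acc = acc ++ pvDigits n := by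
  fun_induction pvDigits n with
  | case1 n h ih =>
      intro acc
      rw [digitsLoopB, if_pos h, ih]
      simp
  | case2 n h =>
      intro acc
      rw [digitsLoopB, if_neg h]
      simp

lemma foldl_ignore_len {α β σ : Type} (g : σ → σ) :
    ∀ (l₁ : List α) (l₂ : List β), l₁.length = l₂.length →
      ∀ st, l₁.foldl (fun s _ => g s) st = l₂.foldl (fun s _ => g s) st := by
  intro l₁
  induction l₁ with
  | nil => intro l₂ h st; cases l₂ <;> simp_all
  | cons x t ih =>
      intro l₂ h st
      cases l₂ with
      | nil => simp at h
      | cons y t₂ => simpa using ih t₂ (by simpa using h) (g st)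

lemma inner_eq (i c : Int) (st : Int × Int) :
    (PySem.List.pyRange 0 c 1).foldl (fun st _ => (st.1 + i * st.2, st.2 * 10)) st
      = (List.replicate c.toNat i).foldl pvStep st := by
  have h1 : (List.replicate c.toNat i).foldl pvStep st
      = (List.replicate c.toNat i).foldl (fun s (_ : Int) => pvStep s i) st := by
    induction c.toNat generalizing st with
    | zero => rfl
    | succ m ih => simp [List.replicate_succ, List.foldl_cons, ih]
  rw [h1]
  exact foldl_ignore_len (fun s => pvStep s i) _ _
    (by simp [PySem.List.length_pyRange_one]) st

lemma outer_eq (cnt : List Int) : ∀ (s : Int) (st : Int × Int),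
    (PySem.List.enumerate cnt s).foldl
      (fun st p => (PySem.List.pyRange 0 p.2 1).foldl
        (fun st _ => (st.1 + p.1 * st.2, st.2 * 10)) st) st
      = (pvAsc cnt s).foldl pvStep st := by
  induction cnt with
  | nil => intro s st; simp [pvAsc, PySem.List.enumerate_nil]
  | cons c t ih =>
      intro s st
      rw [PySem.List.enumerate_cons, List.foldl_cons, pvAsc, List.foldl_append, ih]
      rw [inner_eq]

lemma foldl_pvStep (l : List Int) : ∀ a p : Int,
    l.foldl pvStep (a, p) = (a + p * pvVal l, p * 10 ^ l.length) := by
  induction l with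
  | nil => intro a p; simp [pvVal]
  | cons d t ih =>
      intro a p
      rw [List.foldl_cons]
      show t.foldl pvStep (a + d * p, p * 10) = _
      rw [ih]
      simp [pvVal]
      constructor
      · ring
      · ring

lemma horner_reverse (l : List Int) : ∀ a : Int,
    l.reverse.foldl (fun x d => x * 10 + d) a = a * 10 ^ l.length + pvVal l := by
  induction l with
  | nil => intro a; simp [pvVal]
  | cons d t ih =>
      intro a
      rw [List.reverse_cons, List.foldl_append, ih]
      simp [pvVal]
      ring

lemma countLoopA_spec (n : Int) (cnt : List Int) : cnt.length = 10 →
    (countLoopA n cnt).length = 10 ∧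
      ∀ k : Nat, k < 10 →
        (countLoopA n cnt).getD k 0 = cnt.getD k 0 + ((pvDigits n).count (k : Int) : Int) := by
  fun_induction countLoopA n cnt with
  | case1 n cnt h ih =>
      intro hlen
      have hm0 : 0 ≤ PySem.Int.mod n 10 := PySem.Int.mod_nonneg _ (by norm_num)
      have hm1 : PySem.Int.mod n 10 < 10 := PySem.Int.mod_lt _ (by norm_num)
      set d : Nat := (PySem.Int.mod n 10).toNat with hd
      have hdint : (PySem.Int.mod n 10) = (d : Int) := (Int.toNat_of_nonneg hm0).symm
      have hdlt : d < 10 := by omega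
      have hset : PySem.List.pySetD cnt (PySem.Int.mod n 10)
          (PySem.List.pyGetD cnt (PySem.Int.mod n 10) 0 + 1)
          = cnt.set d (cnt.getD d 0 + 1) := by
        rw [PySem.List.pySetD_of_nonneg _ _ hm0,
            PySem.List.pyGetD_eq_getElem _ _ hm0 (by omega)]
        congr 1
        rw [List.getD_eq_getElem?_getD, List.getElem?_eq_getElem (by omega : d < cnt.length)]
        rfl
      rw [hset] at ih ⊢
      obtain ⟨ihlen, ihval⟩ := ih (by simp [hlen])
      refine ⟨ihlen, ?_⟩
      intro k hk
      rw [ihval k hk]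
      conv_rhs => rw [pvDigits, if_pos h]
      rw [List.count_cons]
      have hgd : (cnt.set d (cnt.getD d 0 + 1)).getD k 0
          = if d = k then cnt.getD k 0 + 1 else cnt.getD k 0 := by
        rw [List.getD_eq_getElem?_getD, List.getElem?_set]
        split_ifs with h1 h2
        · subst h1; rw [List.getD_eq_getElem?_getD]; simp
        · omega
        · rw [List.getD_eq_getElem?_getD]
      rw [hgd]
      by_cases hkd : d = k
      · subst hkd
        rw [if_pos rfl, if_pos (by simp only [beq_iff_eq]; exact hdint)]
        push_cast
        ring
      · rw [if_neg hkd, if_neg (by simp only [beq_iff_eq, hdint, Int.natCast_inj]; exact fun he => hkd he)]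
        push_cast
        ring
  | case2 n cnt h =>
      intro hlen
      rw [pvDigits, if_neg h]
      simp [hlen]

lemma pvAsc_count (cnt : List Int) : ∀ (s v : Int),
    List.count v (pvAsc cnt s) =
      if 0 ≤ v - s ∧ v - s < cnt.length then (cnt.getD (v - s).toNat 0).toNat else 0 := by
  induction cnt with
  | nil =>
      intro s v
      rw [pvAsc]
      split_ifs with hc
      · simp at hc; omega
      · simp
  | cons c t ih =>
      intro s v
      rw [pvAsc, List.count_append, List.count_replicate, ih (s + 1) v]
      by_cases hv : v = s
      · subst hv
        rw [if_pos (by simp), if_neg (by omega)]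
        simp
      · rw [if_neg (by simp only [beq_iff_eq]; exact fun he => hv he.symm)]
        by_cases hin : 0 ≤ v - (s + 1) ∧ v - (s + 1) < (t.length : Int)
        · rw [if_pos hin, if_pos (by simp; omega)]
          have : (v - s).toNat = (v - (s + 1)).toNat + 1 := by omega
          rw [this, List.getD_cons_succ]
          omega
        · rw [if_neg hin, if_neg (by simp; omega)]

lemma pvAsc_sorted (cnt : List Int) : ∀ s : Int,
    (∀ x ∈ pvAsc cnt s, s ≤ x) ∧ (pvAsc cnt s).Pairwise (· ≤ ·) := by
  induction cnt with
  | nil => intro s; simp [pvAsc]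
  | cons c t ih =>
      intro s
      obtain ⟨ihmem, ihpw⟩ := ih (s + 1)
      constructor
      · intro x hx
        rcases List.mem_append.mp hx with hx | hx
        · exact le_of_eq (List.eq_of_mem_replicate hx).symm
        · exact le_trans (by omega) (ihmem x hx)
      · rw [pvAsc]
        apply List.pairwise_append.mpr
        refine ⟨List.pairwise_replicate_of_refl, ihpw, ?_⟩
        intro a ha b hb
        have := List.eq_of_mem_replicate ha
        subst this
        exact le_trans (by omega) (ihmem b hb)

lemma asc_perm_digits (n : Int) :
    (pvAsc (countLoopA n (List.replicate 10 0)) 0).Perm (pvDigits n) := by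
  obtain ⟨hlen, hval⟩ := countLoopA_spec n (List.replicate 10 0) (by simp)
  apply List.perm_iff_count.mpr
  intro v
  rw [pvAsc_count, hlen]
  by_cases hv : 0 ≤ v ∧ v < 10
  · rw [if_pos (by simpa using hv), sub_zero]
    have hvk : v = ((v.toNat : Nat) : Int) := by omega
    rw [hval v.toNat (by omega), ← hvk, List.getD_replicate]
    · omega
    · omega
  · rw [if_neg (by simpa using hv)]
    symm
    apply List.count_eq_zero.mpr
    intro hmem
    have := pvDigits_nonneg_lt n v hmem
    omega

lemma sorted_false_eq (n : Int) :
    PySem.List.sorted (pvDigits n) (fun d => d) false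
      = pvAsc (countLoopA n (List.replicate 10 0)) 0 := by
  exact PySem.List.sorted_id_eq_of_perm_of_pairwise _ _
    (asc_perm_digits n) (pvAsc_sorted _ 0).2

lemma sorted_true_eq_reverse (l : List Int) :
    PySem.List.sorted l (fun d => d) true = (PySem.List.sorted l (fun d => d) false).reverse := by
  apply PySem.List.eq_of_perm_of_pairwise_le_of_injective (fun x : Int => -x) neg_injective
  · exact (PySem.List.sorted_perm l _ true).trans
      ((PySem.List.sorted_perm l _ false).symm.trans (List.reverse_perm _).symm)
  · exact (PySem.List.sorted_pairwise_rev l _).imp (by intro a b hab; simp; exact hab)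
  · exact List.pairwise_reverse.mpr ((PySem.List.sorted_pairwise l _).imp (by intro a b hab; simp; exact hab))

-- ===== VERDICT (by name: the statement is the Claim_ definition above) =====
theorem solution_spec : Claim_equal_solution := by
  intro n _
  unfold Spec_solution solution solution_alt
  have hrep : PySem.List.pyRepeat [(0 : Int)] 10 = List.replicate 10 (0 : Int) := by
    rw [PySem.List.pyRepeat_singleton]
    rfl
  dsimp only
  rw [hrep, outer_eq, digitsLoopB_eq, List.nil_append, sorted_true_eq_reverse,
      sorted_false_eq, horner_reverse, foldl_pvStep]
  simp
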